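-- pv_equiv track=rewrite | github.com/cj-torres/complex_hierarchy | src/language_builders.py | anbm_checker
-- ===== SOURCE A (Python) =====
-- def anbm_checker(string):
--     flip = False
--     for s in string:
--         if not flip:
--             if s == "b":
--                 flip = True
--         elif s == "a":
--             return False
--     return True
-- ===== SOURCE B (Python) =====
-- def anbm_checker(string):
--     ab = [c for c in string if c in "ab"]
--     return ab == sorted(ab)
-- ===== Notes on version B (the rewrite author's own statement) =====
-- stated objective: alternative
-- what changed: Replaces the per-character flip-flag state machine with an order-theoretic reformulation: project the string onto its 'a'/'b' letters and accept iff that projection is already sorted (all 'a's before all 'b's).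
import Mathlib
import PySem

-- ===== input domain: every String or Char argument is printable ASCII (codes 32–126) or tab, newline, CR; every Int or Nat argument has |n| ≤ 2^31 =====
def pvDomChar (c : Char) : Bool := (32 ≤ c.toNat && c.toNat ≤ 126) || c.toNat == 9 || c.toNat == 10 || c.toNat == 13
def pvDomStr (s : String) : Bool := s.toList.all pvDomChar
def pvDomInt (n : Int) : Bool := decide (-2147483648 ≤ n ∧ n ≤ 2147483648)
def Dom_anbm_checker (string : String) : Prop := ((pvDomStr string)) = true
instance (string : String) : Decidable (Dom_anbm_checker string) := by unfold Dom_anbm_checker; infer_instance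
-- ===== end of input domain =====

-- B replaces A's flip-flag state machine with an order-theoretic reformulation: project the
-- string onto its 'a'/'b' letters and accept iff that projection is already sorted (alternative).

-- ===== PORT A =====
def anbmLoop : List Char → Bool → Bool
  | [], _ => true
  | s :: rest, flip =>
    if !flip then
      if s == 'b' then anbmLoop rest true else anbmLoop rest flip
    else
      if s == 'a' then false else anbmLoop rest flip

def anbm_checker (string : String) : Bool := anbmLoop string.toList false

-- ===== PORT B =====
def anbm_checker_alt (string : String) : Bool :=
  -- ab = [c for c in string if c in "ab"]  (c in "ab" is Python substring containment)
  let ab := string.toList.filter (fun c => PySem.Chars.isIn [c] "ab".toList)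
  -- ab == sorted(ab)
  ab == PySem.List.sorted ab (fun c => c) false

-- ===== PRECONDITION & SPEC =====
def Spec_anbm_checker (string : String) (out : Bool) : Prop := out = anbm_checker_alt string
instance (string : String) (out : Bool) : Decidable (Spec_anbm_checker string out) := by unfold Spec_anbm_checker; infer_instance

-- ===== CLAIM (what is proved, stated in full; the proofs are below) =====
def Claim_equal_anbm_checker : Prop := ∀ (string : String), Dom_anbm_checker string → Spec_anbm_checker string (anbm_checker string)

-- ===== LEMMAS AND PROOFS =====

-- 'c in "ab"' holds exactly for the letters 'a' and 'b'
theorem isIn_ab (c : Char) : PySem.Chars.isIn [c] "ab".toList = (c == 'a' || c == 'b') := by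
  by_cases h : c = 'a' ∨ c = 'b'
  · rcases h with h | h <;> subst h <;> decide
  · push_neg at h
    rw [(PySem.Chars.isIn_eq_false_iff _ _).2]
    · simp [h.1, h.2]
    · intro hinf
      have : c ∈ "ab".toList := (List.singleton_infix_iff c _).1 hinf
      simp at this
      tauto

-- A's loop never looks at letters other than 'a'/'b': it factors through the projection
theorem anbmLoop_filter (cs : List Char) (flip : Bool) :
    anbmLoop cs flip = anbmLoop (cs.filter (fun c => c == 'a' || c == 'b')) flip := by
  induction cs generalizing flip with
  | nil => rfl
  | cons c rest ih =>
    by_cases ha : c = 'a'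
    · subst ha; cases flip <;> simp [anbmLoop, ih]
    · by_cases hb : c = 'b'
      · subst hb; cases flip <;> simp [anbmLoop, ih]
      · have : (c == 'a' || c == 'b') = false := by simp [ha, hb]
        cases flip <;> simp [anbmLoop, this, ha, hb, ih]

-- in the flipped state A returns True iff no 'a' remains
theorem anbmLoop_flip (cs : List Char) : anbmLoop cs true = !(cs.contains 'a') := by
  induction cs with
  | nil => rfl
  | cons c rest ih =>
    by_cases h : c = 'a' <;> simp [anbmLoop, h, ih, Ne.symm]

theorem pairwise_le_helper (l : List Char) (h : ∀ x ∈ l, x = 'b') :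
    l.Pairwise (fun a b => a = 'b' ∧ b = 'b') := by
  induction l with
  | nil => exact List.Pairwise.nil
  | cons c rest ih =>
    exact List.pairwise_cons.2 ⟨fun x hx => ⟨h c List.mem_cons_self, h x (List.mem_cons_of_mem c hx)⟩,
      ih fun x hx => h x (List.mem_cons_of_mem c hx)⟩

-- on a list of 'a'/'b' letters, A's loop accepts iff the list is nondecreasing
theorem anbmLoop_ab (l : List Char) (hl : ∀ c ∈ l, c = 'a' ∨ c = 'b') :
    anbmLoop l false = decide (l.Pairwise (· ≤ ·)) := by
  induction l with
  | nil => rfl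
  | cons c rest ih =>
    have hrest : ∀ x ∈ rest, x = 'a' ∨ x = 'b' := fun x hx => hl x (List.mem_cons_of_mem c hx)
    rcases hl c List.mem_cons_self with hc | hc <;> subst hc
    · have hle : ∀ x ∈ rest, 'a' ≤ x := by
        intro x hx; rcases hrest x hx with h | h <;> subst h <;> decide
      rw [show anbmLoop ('a' :: rest) false = anbmLoop rest false from by simp [anbmLoop],
        ih hrest, decide_eq_decide, List.pairwise_cons]
      exact ⟨fun h => ⟨hle, h⟩, fun h => h.2⟩
    · rw [show anbmLoop ('b' :: rest) false = anbmLoop rest true from by simp [anbmLoop],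
        anbmLoop_flip]
      by_cases hmem : 'a' ∈ rest
      · have : ¬ ('b' :: rest).Pairwise (· ≤ ·) := by
          intro hp
          have := (List.pairwise_cons.1 hp).1 'a' hmem
          exact absurd this (by decide)
        simp [hmem, this]
      · have hball : ∀ x ∈ rest, x = 'b' := by
          intro x hx; rcases hrest x hx with h | h
          · exact absurd (h ▸ hx) hmem
          · exact h
        have hp : ('b' :: rest).Pairwise (· ≤ ·) := by
          rw [List.pairwise_cons]
          constructor
          · intro x hx; rw [hball x hx]
          · exact (pairwise_le_helper rest hball).imp (by rintro a b ⟨rfl, rfl⟩; exact le_refl _)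
        simp [hmem, hp]

-- a list equals its own Python sort iff it is nondecreasing
theorem beq_sorted (l : List Char) :
    (l == PySem.List.sorted l (fun c => c) false) = decide (l.Pairwise (· ≤ ·)) := by
  by_cases hp : l.Pairwise (· ≤ ·)
  · have h := PySem.List.sorted_eq_self_of_pairwise l (fun c : Char => c) (by simpa using hp)
    rw [h]; simp [hp]
  · have hne : l ≠ PySem.List.sorted l (fun c => c) false := by
      intro he
      exact hp (by simpa using he ▸ PySem.List.sorted_pairwise l (fun c : Char => c))
    simp [hne, hp]

-- ===== VERDICT (by name: the statement is the Claim_ definition above) =====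
theorem anbm_checker_spec : Claim_equal_anbm_checker := by
  intro s _
  unfold Spec_anbm_checker anbm_checker anbm_checker_alt
  simp only [isIn_ab]
  rw [anbmLoop_filter, beq_sorted]
  exact anbmLoop_ab _ (by intro c hc; have := (List.mem_filter.1 hc).2; simpa using this)
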